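-- pv_equiv track=rewrite | github.com/crisubianca/PY2022 | Lab2/lab2_ex9.py | stadium
-- ===== SOURCE A (Python) =====
-- def stadium(matrix):
--
--     list_of_positions = []
--     matrix_transpose = list(zip(*matrix))
--
--     for c in range(len(matrix_transpose)):
--         for l in range(1, len(matrix_transpose[0])):
--             if matrix_transpose[c][l] <= max(matrix_transpose[c][:l]):
--                 list_of_positions.append(tuple((l, c)))
--     return list_of_positions
-- ===== SOURCE B (Python) =====
-- def stadium(matrix):
--     # Running max down each column instead of recomputing max over the prefix.
--     if not matrix:
--         return []
--     positions = []
--     ncols = min(len(row) for row in matrix)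
--     for c in range(ncols):
--         running = matrix[0][c]
--         for l in range(1, len(matrix)):
--             v = matrix[l][c]
--             if v <= running:
--                 positions.append((l, c))
--             else:
--                 running = v
--     return positions
-- ===== Notes on version B (the rewrite author's own statement) =====
-- stated objective: faster
-- what changed: Instead of transposing the matrix and recomputing max(column[:l]) from scratch at every row, B walks each column once keeping a running maximum, removing the inner prefix-max scan.
import Mathlib
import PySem

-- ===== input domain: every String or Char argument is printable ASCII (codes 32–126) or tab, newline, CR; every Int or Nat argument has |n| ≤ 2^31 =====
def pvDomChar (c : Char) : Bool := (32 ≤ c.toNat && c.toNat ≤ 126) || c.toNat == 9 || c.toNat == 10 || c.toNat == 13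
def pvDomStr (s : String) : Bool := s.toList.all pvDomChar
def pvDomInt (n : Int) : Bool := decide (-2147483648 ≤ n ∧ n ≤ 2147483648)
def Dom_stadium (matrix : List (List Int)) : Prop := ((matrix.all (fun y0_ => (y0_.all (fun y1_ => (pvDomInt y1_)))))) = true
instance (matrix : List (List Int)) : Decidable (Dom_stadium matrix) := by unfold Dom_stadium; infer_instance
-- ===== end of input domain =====

-- B is a faster re-implementation: running maximum down each column (O(C·R)) instead of
-- transposing and recomputing the prefix maximum at every row (O(C·R²)).

-- ===== PORT A =====
-- number of columns produced by zip(*matrix): min row length (0 for no rows)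
def pvColCount (m : List (List Int)) : Nat :=
  match m with
  | [] => 0
  | r :: rs => rs.foldl (fun a r' => min a r'.length) r.length

-- list(zip(*matrix)) : column j is [row[j] for row in matrix], j < min row length
def pvTranspose (m : List (List Int)) : List (List Int) :=
  (List.range (pvColCount m)).map (fun j => m.map (fun r => r.getD j 0))

def stadium (matrix : List (List Int)) : List (Int × Int) :=
  let t := pvTranspose matrix
  (List.range t.length).foldl (fun acc c =>
    (List.range' 1 ((t.getD 0 []).length - 1)).foldl (fun acc2 l =>
      let col := t.getD c []
      if col.getD l 0 ≤ (PySem.List.max? (col.take l) (fun y => y)).getD 0 then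
        acc2 ++ [((l : Int), (c : Int))]
      else acc2) acc) []

-- ===== PORT B =====
def stadium_alt (matrix : List (List Int)) : List (Int × Int) :=
  match matrix with
  | [] => []
  | r0 :: rs =>
    let ncols := rs.foldl (fun a r' => min a r'.length) r0.length
    (List.range ncols).foldl (fun acc c =>
      ((List.range' 1 (matrix.length - 1)).foldl
        (fun (st : Int × List (Int × Int)) l =>
          let v := (matrix.getD l []).getD c 0
          if v ≤ st.1 then (st.1, st.2 ++ [((l : Int), (c : Int))])
          else (v, st.2))
        (r0.getD c 0, acc)).2) []

-- ===== PRECONDITION & SPEC =====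
def Spec_stadium (matrix : List (List Int)) (out : List (Int × Int)) : Prop := out = stadium_alt matrix
instance (matrix : List (List Int)) (out : List (Int × Int)) : Decidable (Spec_stadium matrix out) := by unfold Spec_stadium; infer_instance

-- ===== CLAIM (what is proved, stated in full; the proofs are below) =====
def Claim_equal_stadium : Prop := ∀ (matrix : List (List Int)), Dom_stadium matrix → Spec_stadium matrix (stadium matrix)

-- ===== LEMMAS AND PROOFS =====

-- chained getD on the matrix = getD on the mapped column
theorem getD_getD_map (m : List (List Int)) (l c : Nat) :
    (m.getD l []).getD c 0 = (m.map (fun r => r.getD c 0)).getD l 0 := by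
  induction m generalizing l with
  | nil => cases l <;> simp
  | cons r rs ih => cases l with
    | zero => simp
    | succ k => simpa using ih k

-- the heart: per column, the prefix-max test of A equals the running-max fold of B
theorem inner_eq (cI : Int) (x : Int) (xs : List Int) :
    ∀ (n j : Nat) (acc : List (Int × Int)), j + n ≤ xs.length →
    (List.range' (j+1) n).foldl (fun acc2 l =>
        if (x :: xs).getD l 0 ≤ (PySem.List.max? ((x :: xs).take l) (fun y => y)).getD 0 then
          acc2 ++ [((l : Int), cI)]
        else acc2) acc
    = ((List.range' (j+1) n).foldl
        (fun (st : Int × List (Int × Int)) l =>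
          let v := (x :: xs).getD l 0
          if v ≤ st.1 then (st.1, st.2 ++ [((l : Int), cI)]) else (v, st.2))
        ((xs.take j).foldl max x, acc)).2 := by
  intro n
  induction n with
  | zero => intro j acc _; simp
  | succ n ih =>
    intro j acc hle
    have hj : j < xs.length := by omega
    rw [List.range'_succ, List.foldl_cons, List.foldl_cons]
    have hget : (x :: xs).getD (j+1) 0 = xs[j] := by
      simp [List.getD, List.getElem?_eq_getElem hj]
    have htake : (x :: xs).take (j+1) = x :: xs.take j := by simp
    have hmax : (PySem.List.max? ((x :: xs).take (j+1)) (fun y => y)).getD 0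
        = (xs.take j).foldl max x := by
      rw [htake, PySem.List.max?_id_cons]; rfl
    have htakeS : (xs.take (j+1)).foldl max x = max ((xs.take j).foldl max x) xs[j] := by
      have h1 : xs.take (j+1) = xs.take j ++ [xs[j]] := by
        rw [List.take_add_one, List.getElem?_eq_getElem hj]; rfl
      rw [h1, List.foldl_append]; rfl
    by_cases hc : xs[j] ≤ (xs.take j).foldl max x
    · simp only [hget, hmax, if_pos hc]
      have : max ((xs.take j).foldl max x) xs[j] = (xs.take j).foldl max x :=
        max_eq_left hc
      have h2 := ih (j+1) (acc ++ [(((j:Int)+1), cI)]) (by omega)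
      rw [htakeS, this] at h2
      simpa using h2
    · simp only [hget, hmax, if_neg hc]
      have : max ((xs.take j).foldl max x) xs[j] = xs[j] :=
        max_eq_right ((not_le.mp hc).le)
      have h2 := ih (j+1) acc (by omega)
      rw [htakeS, this] at h2
      simpa using h2

theorem stadium_spec' (matrix : List (List Int)) : stadium matrix = stadium_alt matrix := by
  cases matrix with
  | nil => rfl
  | cons r0 rs =>
    unfold stadium stadium_alt pvTranspose
    simp only [List.length_map, List.length_range]
    apply PySem.List.foldl_congr_mem
    intro acc c hc
    have hcC : c < pvColCount (r0 :: rs) := by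
      simpa using List.mem_range.mp hc
    have hC0 : 0 < pvColCount (r0 :: rs) := by omega
    -- column c of the transpose
    have hcol : ((List.range (pvColCount (r0 :: rs))).map
        (fun j => (r0 :: rs).map (fun r => r.getD j 0))).getD c []
        = (r0 :: rs).map (fun r => r.getD c 0) := by
      rw [List.getD_eq_getElem?_getD, List.getElem?_map,
        List.getElem?_range hcC]
      rfl
    -- row 0 of the transpose has length = number of rows
    have hrow0 : (((List.range (pvColCount (r0 :: rs))).map
        (fun j => (r0 :: rs).map (fun r => r.getD j 0))).getD 0 []).length
        = rs.length + 1 := by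
      rw [List.getD_eq_getElem?_getD, List.getElem?_map,
        List.getElem?_range hC0]
      simp
    rw [hrow0, hcol]
    have key := inner_eq (c : Int) (r0.getD c 0) (rs.map (fun r => r.getD c 0))
      rs.length 0 acc (by simp)
    simp only [List.take_zero, List.foldl_nil] at key
    have hcol2 : (r0 :: rs).map (fun r => r.getD c 0)
        = r0.getD c 0 :: rs.map (fun r => r.getD c 0) := by simp
    rw [show rs.length + 1 - 1 = rs.length from rfl, hcol2, key]
    congr 1
    apply PySem.List.foldl_congr_mem
    intro st l _
    simp only [getD_getD_map (r0 :: rs) l c, hcol2]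

-- ===== VERDICT (by name: the statement is the Claim_ definition above) =====
theorem stadium_spec : Claim_equal_stadium := by
  intro matrix _
  unfold Spec_stadium
  exact stadium_spec' matrix
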